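-- pv_equiv track=rewrite | github.com/BlueJ1/Kattis | 0-1_sequences.py | rec_f
-- ===== SOURCE A (Python) =====
-- def swaps(zeros, ones):
--     n_swaps = 0
--     n_z = len(zeros)
--     for i in range(n_z):
--         n_swaps += zeros[i] - i
--     for i in range(len(ones)):
--         n_swaps += (n_z + i) - ones[i]
--
--     return n_swaps
--
-- def rec_f(qmarks: list, zeros: list, ones: list):
--     if len(qmarks) == 0:
--         n_swaps = swaps(sorted(zeros), sorted(ones))
--         return n_swaps
--
--     zeros.append(qmarks[0])
--     n_swaps = rec_f(qmarks[1:], zeros, ones)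
--     zeros.pop()
--     ones.append(qmarks[0])
--     n_swaps += rec_f(qmarks[1:], zeros, ones)
--     ones.pop()
--     return n_swaps
-- ===== SOURCE B (Python) =====
-- def rec_f(qmarks: list, zeros: list, ones: list):
--     # Closed form: swaps(sorted(zs), sorted(os)) = sum(zs) - C2(z) + z*o + C2(o) - sum(os),
--     # so the 2^k-way recursion collapses to a single binomial sum over j = #qmarks sent to zeros.
--     k = len(qmarks)
--     z = len(zeros)
--     o = len(ones)
--     Z = sum(zeros)
--     O = sum(ones)
--     total = (Z - O) * 2 ** k
--     c = 1  # running binomial coefficient C(k, j)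
--     for j in range(k + 1):
--         zj = z + j
--         oj = o + (k - j)
--         f = zj * oj + oj * (oj - 1) // 2 - zj * (zj - 1) // 2
--         total += c * f
--         c = c * (k - j) // (j + 1)
--     return total
-- ===== Notes on version B (the rewrite author's own statement) =====
-- stated objective: faster
-- what changed: Replaced the 2^k-branch recursion (which sorts and rescans zeros/ones at every leaf) by a closed form: the swap count depends only on sums and lengths, so the total over all assignments is (sum(zeros)-sum(ones))*2^k plus a single binomial-weighted sum over how many qmarks go to zeros.
import Mathlib
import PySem

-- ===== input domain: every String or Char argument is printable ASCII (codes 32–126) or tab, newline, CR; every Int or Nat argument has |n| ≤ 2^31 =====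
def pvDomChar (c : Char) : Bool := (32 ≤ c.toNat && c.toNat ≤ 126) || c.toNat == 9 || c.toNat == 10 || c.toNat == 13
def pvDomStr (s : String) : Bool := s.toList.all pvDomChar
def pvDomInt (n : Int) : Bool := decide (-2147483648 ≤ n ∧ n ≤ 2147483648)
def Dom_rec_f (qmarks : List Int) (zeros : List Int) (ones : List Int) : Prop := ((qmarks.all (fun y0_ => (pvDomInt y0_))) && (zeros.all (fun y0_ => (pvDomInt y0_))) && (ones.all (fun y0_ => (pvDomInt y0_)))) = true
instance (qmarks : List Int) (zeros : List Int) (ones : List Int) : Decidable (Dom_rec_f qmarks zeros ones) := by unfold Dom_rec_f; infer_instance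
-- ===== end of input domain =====

-- B replaces A's 2^k-leaf recursion (sorting at each leaf) by an O(N+k) binomial closed form; proved equal on all inputs.
-- A temporarily appends to / pops from zeros and ones but restores them; return value only is claimed.

-- ===== PORT A =====
def swapsA (zeros : List Int) (ones : List Int) : Int :=
  (PySem.List.pyRange 0 (PySem.List.len ones) 1).foldl
    (fun acc i => acc + ((PySem.List.len zeros + i) - PySem.List.pyGetD ones i 0))
    ((PySem.List.pyRange 0 (PySem.List.len zeros) 1).foldl
      (fun acc i => acc + (PySem.List.pyGetD zeros i 0 - i)) 0)

def rec_f (qmarks : List Int) (zeros : List Int) (ones : List Int) : Int :=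
  match qmarks with
  | [] => swapsA (PySem.List.sorted zeros (fun x => x) false) (PySem.List.sorted ones (fun x => x) false)
  | q :: rest =>
      rec_f rest (zeros ++ [q]) ones + rec_f rest zeros (ones ++ [q])

-- ===== PORT B =====
def rec_f_alt (qmarks : List Int) (zeros : List Int) (ones : List Int) : Int :=
  let k : Int := PySem.List.len qmarks
  let z : Int := PySem.List.len zeros
  let o : Int := PySem.List.len ones
  let Z : Int := zeros.sum
  let O : Int := ones.sum
  let total0 : Int := (Z - O) * 2 ^ qmarks.length
  ((PySem.List.pyRange 0 (k + 1) 1).foldl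
    (fun (st : Int × Int) j =>
      let zj := z + j
      let oj := o + (k - j)
      let f := zj * oj + PySem.Int.floordiv (oj * (oj - 1)) 2 - PySem.Int.floordiv (zj * (zj - 1)) 2
      (st.1 + st.2 * f, PySem.Int.floordiv (st.2 * (k - j)) (j + 1)))
    (total0, 1)).1

-- ===== PRECONDITION & SPEC =====
def Spec_rec_f (qmarks : List Int) (zeros : List Int) (ones : List Int) (out : Int) : Prop := out = rec_f_alt qmarks zeros ones
instance (qmarks : List Int) (zeros : List Int) (ones : List Int) (out : Int) : Decidable (Spec_rec_f qmarks zeros ones out) := by unfold Spec_rec_f; infer_instance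

-- ===== CLAIM (what is proved, stated in full; the proofs are below) =====
def Claim_equal_rec_f : Prop := ∀ (qmarks : List Int) (zeros : List Int) (ones : List Int), Dom_rec_f qmarks zeros ones → Spec_rec_f qmarks zeros ones (rec_f qmarks zeros ones)

-- ===== LEMMAS AND PROOFS =====

-- T n = n*(n-1)/2 (number of index pairs among n items)
def triN (n : Nat) : Nat := n * (n - 1) / 2

-- contribution of one leaf with z zeros and o ones (lengths only; sums handled separately)
def leafI (a b : Nat) : Int := (a : Int) * b + (triN b : Int) - (triN a : Int)

-- closed form F k z o Z O = value of the whole recursion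
def FF (k z o : Nat) (Z O : Int) : Int :=
  (Z - O) * 2 ^ k + ∑ j ∈ Finset.range (k + 1), (Nat.choose k j : Int) * leafI (z + j) (o + (k - j))

theorem triN_succ (n : Nat) : triN (n + 1) = triN n + n := by
  unfold triN
  obtain ⟨m, hm⟩ : Even (n * (n - 1)) := by
    cases n with
    | zero => simp
    | succ m => rw [Nat.succ_sub_one, Nat.mul_comm]; exact Nat.even_mul_succ_self m
  have h2 : (n + 1) * (n + 1 - 1) = n * (n - 1) + 2 * n := by
    cases n with
    | zero => simp
    | succ m => rw [Nat.succ_sub_one, Nat.succ_sub_one]; ring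
  omega

theorem floordiv_tri (n : Nat) : PySem.Int.floordiv ((n : Int) * ((n : Int) - 1)) 2 = (triN n : Int) := by
  cases n with
  | zero => decide
  | succ m =>
      have h1 : ((m + 1 : Nat) : Int) * (((m + 1 : Nat) : Int) - 1) = (((m + 1) * m : Nat) : Int) := by
        push_cast; ring
      rw [h1]
      have h2 := PySem.Int.floordiv_natCast ((m + 1) * m) 2
      rw [show ((2 : Int)) = ((2 : Nat) : Int) by norm_num] at *
      rw [h2]
      norm_cast

-- sum over range of getElem: fold lemma 1 (the zeros loop of swaps)
theorem fold_zeros (xs : List Int) (acc : Int) :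
    (PySem.List.pyRange 0 (PySem.List.len xs) 1).foldl
      (fun a i => a + (PySem.List.pyGetD xs i 0 - i)) acc
    = acc + xs.sum - (triN xs.length : Int) := by
  induction xs using List.reverseRecOn generalizing acc with
  | nil => simp [PySem.List.pyRange, triN]
  | append_singleton ys x ih =>
      have hlen : PySem.List.len (ys ++ [x]) = (ys.length : Int) + 1 := by
        simp [PySem.List.len_eq]
      rw [hlen, PySem.List.pyRange_one_succ_right (by positivity)]
      rw [List.foldl_append]
      have hcong : (PySem.List.pyRange 0 (ys.length : Int) 1).foldl
          (fun a i => a + (PySem.List.pyGetD (ys ++ [x]) i 0 - i)) acc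
          = (PySem.List.pyRange 0 (ys.length : Int) 1).foldl
          (fun a i => a + (PySem.List.pyGetD ys i 0 - i)) acc := by
        apply PySem.List.foldl_congr_mem
        intro a i hi
        rw [PySem.List.mem_pyRange_one] at hi
        have h0 : PySem.List.pyGetD (ys ++ [x]) i 0 = PySem.List.pyGetD ys i 0 := by
          obtain ⟨i, rfl⟩ := Int.eq_ofNat_of_zero_le hi.1
          rw [PySem.List.pyGetD_natCast, PySem.List.pyGetD_natCast]
          have : i < ys.length := by exact_mod_cast hi.2
          rw [List.getD_append _ _ _ _ this]
        rw [h0]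
      simp only [List.foldl_cons, List.foldl_nil]
      have ih' := ih acc
      simp only [PySem.List.len_eq] at ih'
      rw [hcong, ih']
      have hx : PySem.List.pyGetD (ys ++ [x]) (ys.length : Int) 0 = x := by
        rw [PySem.List.pyGetD_natCast]
        simp
      rw [hx]
      simp [triN_succ]
      ring

-- fold lemma 2 (the ones loop of swaps)
theorem fold_ones (xs : List Int) (c acc : Int) :
    (PySem.List.pyRange 0 (PySem.List.len xs) 1).foldl
      (fun a i => a + ((c + i) - PySem.List.pyGetD xs i 0)) acc
    = acc + c * xs.length + (triN xs.length : Int) - xs.sum := by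
  induction xs using List.reverseRecOn generalizing acc with
  | nil => simp [PySem.List.pyRange, triN]
  | append_singleton ys x ih =>
      have hlen : PySem.List.len (ys ++ [x]) = (ys.length : Int) + 1 := by
        simp [PySem.List.len_eq]
      rw [hlen, PySem.List.pyRange_one_succ_right (by positivity)]
      rw [List.foldl_append]
      have hcong : (PySem.List.pyRange 0 (ys.length : Int) 1).foldl
          (fun a i => a + ((c + i) - PySem.List.pyGetD (ys ++ [x]) i 0)) acc
          = (PySem.List.pyRange 0 (ys.length : Int) 1).foldl
          (fun a i => a + ((c + i) - PySem.List.pyGetD ys i 0)) acc := by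
        apply PySem.List.foldl_congr_mem
        intro a i hi
        rw [PySem.List.mem_pyRange_one] at hi
        have h0 : PySem.List.pyGetD (ys ++ [x]) i 0 = PySem.List.pyGetD ys i 0 := by
          obtain ⟨i, rfl⟩ := Int.eq_ofNat_of_zero_le hi.1
          rw [PySem.List.pyGetD_natCast, PySem.List.pyGetD_natCast]
          have : i < ys.length := by exact_mod_cast hi.2
          rw [List.getD_append _ _ _ _ this]
        rw [h0]
      simp only [List.foldl_cons, List.foldl_nil]
      have ih' := ih acc
      simp only [PySem.List.len_eq] at ih'
      rw [hcong, ih']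
      have hx : PySem.List.pyGetD (ys ++ [x]) (ys.length : Int) 0 = x := by
        rw [PySem.List.pyGetD_natCast]; simp
      rw [hx]
      simp [triN_succ]
      ring

theorem swapsA_closed (zs os : List Int) :
    swapsA zs os = zs.sum - (triN zs.length : Int) + (zs.length : Int) * os.length
      + (triN os.length : Int) - os.sum := by
  simp only [swapsA]
  rw [fold_zeros, fold_ones]
  simp only [PySem.List.len_eq]
  ring

-- the recursion computes FF
theorem rec_f_eq_FF (qmarks zeros ones : List Int) :
    rec_f qmarks zeros ones = FF qmarks.length zeros.length ones.length zeros.sum ones.sum := by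
  induction qmarks generalizing zeros ones with
  | nil =>
      simp only [rec_f]
      rw [swapsA_closed]
      have pz : (PySem.List.sorted zeros (fun x => x) false).Perm zeros := PySem.List.sorted_perm _ _ _
      have po : (PySem.List.sorted ones (fun x => x) false).Perm ones := PySem.List.sorted_perm _ _ _
      rw [pz.sum_eq, po.sum_eq, pz.length_eq, po.length_eq]
      unfold FF leafI
      simp
      ring
  | cons q rest ih =>
      simp only [rec_f]
      rw [ih, ih]
      simp only [List.length_append, List.length_cons, List.sum_append, List.length_nil,
        List.sum_cons, List.sum_nil]
      -- Pascal step: FF k (z+1) o (Z+q) O + FF k z (o+1) Z (O+q) = FF (k+1) z o Z O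
      generalize rest.length = k
      generalize zeros.length = z
      generalize ones.length = o
      generalize zeros.sum = Z
      generalize ones.sum = O
      unfold FF
      have hpow : (Z + q - O) * 2 ^ k + (Z - (O + q)) * 2 ^ k = (Z - O) * 2 ^ (k + 1) := by ring
      have hs1 : ∑ j ∈ Finset.range (k + 1), (Nat.choose k j : Int) * leafI (z + 1 + j) (o + (k - j))
          = ∑ j ∈ Finset.range (k + 1), (Nat.choose k j : Int) * leafI (z + (j + 1)) (o + (k + 1 - (j + 1))) := by
        apply Finset.sum_congr rfl
        intro j hj
        have hjk : j ≤ k := by simpa [Nat.lt_succ_iff] using hj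
        congr 2 <;> omega
      have hs2 : ∑ j ∈ Finset.range (k + 1), (Nat.choose k j : Int) * leafI (z + j) (o + 1 + (k - j))
          = ∑ j ∈ Finset.range (k + 1), (Nat.choose k j : Int) * leafI (z + j) (o + (k + 1 - j)) := by
        apply Finset.sum_congr rfl
        intro j hj
        have hjk : j ≤ k := by simpa [Nat.lt_succ_iff] using hj
        congr 2
        omega
      rw [hs1, hs2]
      set g : Nat → Int := fun j => leafI (z + j) (o + (k + 1 - j)) with hg
      have key : ∑ j ∈ Finset.range (k + 1), (Nat.choose k j : Int) * g (j + 1)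
          + ∑ j ∈ Finset.range (k + 1), (Nat.choose k j : Int) * g j
          = ∑ j ∈ Finset.range (k + 1 + 1), (Nat.choose (k + 1) j : Int) * g j := by
        have hsplit : ∀ j ∈ Finset.range (k + 1), (Nat.choose (k + 1) (j + 1) : Int) * g (j + 1)
            = (Nat.choose k j : Int) * g (j + 1) + (Nat.choose k (j + 1) : Int) * g (j + 1) := by
          intro j _
          rw [Nat.choose_succ_succ]
          push_cast
          ring
        have e1 : ∑ j ∈ Finset.range (k + 1 + 1), (Nat.choose (k + 1) j : Int) * g j
            = ∑ j ∈ Finset.range (k + 1), (Nat.choose (k + 1) (j + 1) : Int) * g (j + 1)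
              + (Nat.choose (k + 1) 0 : Int) * g 0 :=
          Finset.sum_range_succ' (fun j => (Nat.choose (k + 1) j : Int) * g j) (k + 1)
        have e2 : ∑ j ∈ Finset.range (k + 1 + 1), (Nat.choose k j : Int) * g j
            = ∑ j ∈ Finset.range (k + 1), (Nat.choose k (j + 1) : Int) * g (j + 1)
              + (Nat.choose k 0 : Int) * g 0 :=
          Finset.sum_range_succ' (fun j => (Nat.choose k j : Int) * g j) (k + 1)
        have e3 : ∑ j ∈ Finset.range (k + 1 + 1), (Nat.choose k j : Int) * g j
            = ∑ j ∈ Finset.range (k + 1), (Nat.choose k j : Int) * g j := by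
          rw [Finset.sum_range_succ]
          simp
        rw [e1, Finset.sum_congr rfl hsplit, Finset.sum_add_distrib]
        have e0 : (Nat.choose (k + 1) 0 : Int) = (Nat.choose k 0 : Int) := by simp
        rw [e0]
        linarith [e2, e3]
      linarith [key, hpow]

-- c-update: the running coefficient stays a binomial
theorem choose_step (k j : Nat) (hj : j ≤ k) :
    PySem.Int.floordiv ((Nat.choose k j : Int) * ((k : Int) - (j : Int))) ((j : Int) + 1)
      = (Nat.choose k (j + 1) : Int) := by
  have h1 : (Nat.choose k j : Int) * ((k : Int) - (j : Int)) = ((Nat.choose k j * (k - j) : Nat) : Int) := by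
    push_cast [hj]
    ring
  have h2 : ((j : Int) + 1) = ((j + 1 : Nat) : Int) := by push_cast; ring
  rw [h1, h2, PySem.Int.floordiv_natCast]
  have h3 : Nat.choose k j * (k - j) = Nat.choose k (j + 1) * (j + 1) :=
    (Nat.choose_succ_right_eq k j).symm
  rw [h3, Nat.mul_div_cancel _ (Nat.succ_pos j)]

-- loop invariant for B's fold
theorem alt_loop (k z o : Nat) :
    ∀ (m : Nat), ∀ (t : Int), ∀ (j : Nat), j + m = k + 1 →
    ((PySem.List.pyRange (j : Int) ((k : Int) + 1) 1).foldl
      (fun (st : Int × Int) i =>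
        (st.1 + st.2 * (((z : Int) + i) * ((o : Int) + ((k : Int) - i))
            + PySem.Int.floordiv (((o : Int) + ((k : Int) - i)) * ((o : Int) + ((k : Int) - i) - 1)) 2
            - PySem.Int.floordiv (((z : Int) + i) * ((z : Int) + i - 1)) 2),
          PySem.Int.floordiv (st.2 * ((k : Int) - i)) (i + 1)))
      (t, (Nat.choose k j : Int))).1
    = t + ∑ i ∈ Finset.Ico j (k + 1), (Nat.choose k i : Int) * leafI (z + i) (o + (k - i)) := by
  intro m
  induction m with
  | zero =>
      intro t j hj
      have hj' : j = k + 1 := by omega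
      subst hj'
      rw [PySem.List.pyRange_one_eq_nil (by push_cast; omega)]
      simp
  | succ m ih =>
      intro t j hj
      have hjk : j ≤ k := by omega
      rw [PySem.List.pyRange_one_cons (by push_cast; omega)]
      simp only [List.foldl_cons]
      have hzj : (z : Int) + (j : Int) = ((z + j : Nat) : Int) := (Nat.cast_add z j).symm
      have hoj : (o : Int) + ((k : Int) - (j : Int)) = ((o + (k - j) : Nat) : Int) := by
        push_cast [hjk]
        ring
      have hf : ((z : Int) + j) * ((o : Int) + ((k : Int) - j))
            + PySem.Int.floordiv (((o : Int) + ((k : Int) - j)) * (((o : Int) + ((k : Int) - j)) - 1)) 2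
            - PySem.Int.floordiv (((z : Int) + j) * (((z : Int) + j) - 1)) 2
          = leafI (z + j) (o + (k - j)) := by
        rw [hzj, hoj, floordiv_tri, floordiv_tri]
        unfold leafI
        push_cast
        ring
      rw [choose_step k j hjk, hf]
      rw [show (j : Int) + 1 = ((j + 1 : Nat) : Int) by push_cast; ring]
      rw [ih (t + (Nat.choose k j : Int) * leafI (z + j) (o + (k - j))) (j + 1) (by omega)]
      rw [Finset.sum_eq_sum_Ico_succ_bot (by omega : j < k + 1)]
      ring

theorem rec_f_alt_eq_FF (qmarks zeros ones : List Int) :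
    rec_f_alt qmarks zeros ones = FF qmarks.length zeros.length ones.length zeros.sum ones.sum := by
  simp only [rec_f_alt, PySem.List.len_eq]
  have h := alt_loop qmarks.length zeros.length ones.length (qmarks.length + 1)
    ((zeros.sum - ones.sum) * 2 ^ qmarks.length) 0 (by omega)
  simp only [Nat.cast_zero, Nat.choose_zero_right, Nat.cast_one] at h
  rw [h]
  unfold FF
  rw [Finset.range_eq_Ico]

-- ===== VERDICT (by name: the statement is the Claim_ definition above) =====
theorem rec_f_spec : Claim_equal_rec_f := by
  intro qmarks zeros ones _
  unfold Spec_rec_f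
  rw [rec_f_eq_FF, rec_f_alt_eq_FF]
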